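-- pv_equiv track=rewrite | github.com/glensun810-ai/jhw | backend_python/wechat_backend/services/precompute_service.py | calculate_dimension_scores
-- ===== SOURCE A (Python) =====
-- from typing import Dict, List, Any, Optional
--
-- def calculate_dimension_scores(detailed_results: List[Dict[str, Any]]) -> Dict[str, int]:
--     """
--     计算评分维度
--
--     Args:
--         detailed_results: 详细结果列表
--
--     Returns:
--         dimension_scores: {
--             authority: 80,
--             visibility: 75,
--             purity: 90,
--             consistency: 85
--         }
--     """
--     if not detailed_results or len(detailed_results) == 0:
--         return {
--             'authority': 0,
--             'visibility': 0,
--             'purity': 0,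
--             'consistency': 0
--         }
--
--     # 限制计算数据量，最多 50 条（性能优化）
--     limited_results = detailed_results[:50]
--     total = len(limited_results)
--
--     auth_sum = 0
--     vis_sum = 0
--     pur_sum = 0
--     con_sum = 0
--
--     for result in limited_results:
--         # 从不同字段名兼容获取
--         auth_sum += (
--             result.get('authority_score') or
--             result.get('authority') or
--             result.get('score', 0)
--         )
--         vis_sum += (
--             result.get('visibility_score') or
--             result.get('visibility') or
--             result.get('score', 0)
--         )
--         pur_sum += (
--             result.get('purity_score') or
--             result.get('purity') or
--             result.get('score', 0)
--         )
--         con_sum += (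
--             result.get('consistency_score') or
--             result.get('consistency') or
--             result.get('score', 0)
--         )
--
--     return {
--         'authority': round(auth_sum / total),
--         'visibility': round(vis_sum / total),
--         'purity': round(pur_sum / total),
--         'consistency': round(con_sum / total)
--     }
-- ===== SOURCE B (Python) =====
-- def calculate_dimension_scores(detailed_results):
--     if not detailed_results:
--         return {'authority': 0, 'visibility': 0, 'purity': 0, 'consistency': 0}
--     rs = detailed_results[:50]
--     n = len(rs)
--     # Shared baseline: every dimension's fallback chain bottoms out in 'score',
--     # so sum[d] = base + correction[d], where a record contributes a correction
--     # only when it carries a truthy dimension-specific value.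
--     base = sum(r.get('score', 0) for r in rs)
--     scores = {}
--     for key in ('authority', 'visibility', 'purity', 'consistency'):
--         delta = 0
--         for r in rs:
--             v = r.get(key + '_score') or r.get(key)
--             if v:
--                 delta += v - r.get('score', 0)
--         scores[key] = round((base + delta) / n)
--     return scores
-- ===== Notes on version B (the rewrite author's own statement) =====
-- stated objective: alternative
-- what changed: Instead of summing each dimension's or-fallback chain directly, B computes the shared 'score' baseline sum once and, per dimension, a correction sum of (override - score) for records with a truthy dimension-specific value, using the identity sum[d] = base + delta[d]; field names are derived as key+'_score' rather than spelled out.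
import Mathlib
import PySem

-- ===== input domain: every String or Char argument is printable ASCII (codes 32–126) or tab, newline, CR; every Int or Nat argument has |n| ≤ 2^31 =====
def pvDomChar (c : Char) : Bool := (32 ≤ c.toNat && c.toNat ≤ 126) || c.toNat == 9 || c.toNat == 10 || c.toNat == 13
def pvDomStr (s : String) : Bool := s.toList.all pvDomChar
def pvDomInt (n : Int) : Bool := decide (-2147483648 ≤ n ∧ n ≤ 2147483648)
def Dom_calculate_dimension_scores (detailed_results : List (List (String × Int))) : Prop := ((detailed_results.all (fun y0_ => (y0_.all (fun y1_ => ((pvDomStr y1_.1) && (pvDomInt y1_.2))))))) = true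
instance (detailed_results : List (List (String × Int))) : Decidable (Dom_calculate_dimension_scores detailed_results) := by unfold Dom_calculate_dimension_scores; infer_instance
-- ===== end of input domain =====

-- B replaces A's direct four-accumulator summation of the or-fallback chains with a shared
-- 'score' baseline sum plus per-dimension correction sums (sum[d] = base + delta[d]);
-- objective: alternative. Same return value everywhere.

-- Shared semantic primitive (used by both ports): Python's round(a / b) for ints a, b with b > 0.
-- Exact on the domain: |a| ≤ 50·2^31 and 1 ≤ b ≤ 50, so the float quotient a/b is never rounded
-- across a half-integer boundary and round(a/b) equals banker's rounding of the exact rational a/b.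
def pyRoundDiv (a b : Int) : Int :=
  let q := PySem.Int.floordiv a b
  let r := a - q * b
  if 2 * r < b then q
  else if b < 2 * r then q + 1
  else if q % 2 = 0 then q else q + 1

-- ===== PORT A =====
-- `x.get(f1) or x.get(f2) or x.get('score', 0)` (None and 0 are falsy, values are ints)
def pyOrChain (r : List (String × Int)) (f1 f2 : String) : Int :=
  match (PySem.Dict.mk r).get? f1 with
  | some v => if v ≠ 0 then v else
      match (PySem.Dict.mk r).get? f2 with
      | some w => if w ≠ 0 then w else (PySem.Dict.mk r).getD "score" 0
      | none => (PySem.Dict.mk r).getD "score" 0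
  | none =>
      match (PySem.Dict.mk r).get? f2 with
      | some w => if w ≠ 0 then w else (PySem.Dict.mk r).getD "score" 0
      | none => (PySem.Dict.mk r).getD "score" 0

def calculate_dimension_scores (detailed_results : List (List (String × Int))) : List (String × Int) :=
  if detailed_results = [] then
    [("authority", 0), ("visibility", 0), ("purity", 0), ("consistency", 0)]
  else
    let limited_results := PySem.List.slice detailed_results none (some 50)
    let total : Int := limited_results.length
    let sums := limited_results.foldl
      (fun (acc : Int × Int × Int × Int) result =>
        (acc.1 + pyOrChain result "authority_score" "authority",
         acc.2.1 + pyOrChain result "visibility_score" "visibility",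
         acc.2.2.1 + pyOrChain result "purity_score" "purity",
         acc.2.2.2 + pyOrChain result "consistency_score" "consistency"))
      (0, 0, 0, 0)
    [("authority", pyRoundDiv sums.1 total),
     ("visibility", pyRoundDiv sums.2.1 total),
     ("purity", pyRoundDiv sums.2.2.1 total),
     ("consistency", pyRoundDiv sums.2.2.2 total)]

-- ===== PORT B =====
-- contribution of one record to dimension `key`'s correction sum:
-- `v = r.get(key + '_score') or r.get(key); if v: delta += v - r.get('score', 0)`
def recDelta (r : List (String × Int)) (key : String) : Int :=
  let v : Option Int :=
    match (PySem.Dict.mk r).get? (key ++ "_score") with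
    | some x => if x ≠ 0 then some x else (PySem.Dict.mk r).get? key
    | none => (PySem.Dict.mk r).get? key
  match v with
  | some x => if x ≠ 0 then x - (PySem.Dict.mk r).getD "score" 0 else 0
  | none => 0

def calculate_dimension_scores_alt (detailed_results : List (List (String × Int))) : List (String × Int) :=
  if detailed_results = [] then
    [("authority", 0), ("visibility", 0), ("purity", 0), ("consistency", 0)]
  else
    let rs := PySem.List.slice detailed_results none (some 50)
    let n : Int := rs.length
    let base := (rs.map (fun r => (PySem.Dict.mk r).getD "score" 0)).sum
    (["authority", "visibility", "purity", "consistency"]).foldl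
      (fun (scores : List (String × Int)) key =>
        scores ++ [(key, pyRoundDiv (base + rs.foldl (fun d r => d + recDelta r key) 0) n)])
      []

-- ===== PRECONDITION & SPEC =====
def Spec_calculate_dimension_scores (detailed_results : List (List (String × Int))) (out : List (String × Int)) : Prop := out = calculate_dimension_scores_alt detailed_results
instance (detailed_results : List (List (String × Int))) (out : List (String × Int)) : Decidable (Spec_calculate_dimension_scores detailed_results out) := by unfold Spec_calculate_dimension_scores; infer_instance

-- ===== CLAIM (what is proved, stated in full; the proofs are below) =====
def Claim_equal_calculate_dimension_scores : Prop := ∀ (detailed_results : List (List (String × Int))), Dom_calculate_dimension_scores detailed_results → Spec_calculate_dimension_scores detailed_results (calculate_dimension_scores detailed_results)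

-- ===== LEMMAS AND PROOFS =====

-- per-record algebraic identity: the fallback chain equals the 'score' baseline plus the correction
lemma chain_eq_base_add_delta (r : List (String × Int)) (key : String) :
    pyOrChain r (key ++ "_score") key = (PySem.Dict.mk r).getD "score" 0 + recDelta r key := by
  unfold pyOrChain recDelta
  cases h1 : (PySem.Dict.mk r).get? (key ++ "_score") <;>
    cases h2 : (PySem.Dict.mk r).get? key <;>
    simp <;> split_ifs <;> simp_all

lemma sum_chain (l : List (List (String × Int))) (key : String) :
    (l.map (fun r => pyOrChain r (key ++ "_score") key)).sum
      = (l.map (fun r => (PySem.Dict.mk r).getD "score" 0)).sum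
        + l.foldl (fun d r => d + recDelta r key) 0 := by
  rw [PySem.List.foldl_add]
  induction l with
  | nil => simp
  | cons x xs ih => simp [chain_eq_base_add_delta]; omega

lemma foldl_sums (l : List (List (String × Int))) (a v p c : Int) :
    l.foldl
      (fun (acc : Int × Int × Int × Int) result =>
        (acc.1 + pyOrChain result "authority_score" "authority",
         acc.2.1 + pyOrChain result "visibility_score" "visibility",
         acc.2.2.1 + pyOrChain result "purity_score" "purity",
         acc.2.2.2 + pyOrChain result "consistency_score" "consistency"))
      (a, v, p, c)
    = (a + (l.map (fun r => pyOrChain r "authority_score" "authority")).sum,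
       v + (l.map (fun r => pyOrChain r "visibility_score" "visibility")).sum,
       p + (l.map (fun r => pyOrChain r "purity_score" "purity")).sum,
       c + (l.map (fun r => pyOrChain r "consistency_score" "consistency")).sum) := by
  induction l generalizing a v p c with
  | nil => simp
  | cons x xs ih =>
    rw [List.foldl_cons, ih]
    refine Prod.ext ?_ (Prod.ext ?_ (Prod.ext ?_ ?_)) <;> simp <;> ring

-- ===== VERDICT (by name: the statement is the Claim_ definition above) =====
theorem calculate_dimension_scores_spec : Claim_equal_calculate_dimension_scores := by
  intro dr _
  unfold Spec_calculate_dimension_scores calculate_dimension_scores calculate_dimension_scores_alt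
  by_cases h : dr = []
  · simp [h]
  · simp only [if_neg h, foldl_sums, List.foldl_cons, List.foldl_nil, List.nil_append,
      List.append_assoc, List.singleton_append]
    have e1 := sum_chain (PySem.List.slice dr none (some 50)) "authority"
    have e2 := sum_chain (PySem.List.slice dr none (some 50)) "visibility"
    have e3 := sum_chain (PySem.List.slice dr none (some 50)) "purity"
    have e4 := sum_chain (PySem.List.slice dr none (some 50)) "consistency"
    simp only [show ("authority" ++ "_score" : String) = "authority_score" from rfl,
      show ("visibility" ++ "_score" : String) = "visibility_score" from rfl,
      show ("purity" ++ "_score" : String) = "purity_score" from rfl,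
      show ("consistency" ++ "_score" : String) = "consistency_score" from rfl] at e1 e2 e3 e4
    rw [← e1, ← e2, ← e3, ← e4]
    norm_num
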